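-- pv_equiv track=rewrite | github.com/dra2sun7/Coding_test_with_me | Seo_Min_Jae/[PGS]/신고 결과 받기_level1.py | solution
-- ===== SOURCE A (Python) =====
-- import collections
--
-- def solution(id_list, report, k):
--     answer = []
--     del_dict = collections.defaultdict(list)
--     total = collections.defaultdict(int)
--
--     # 신고 dict
--     for r in set(report):
--         u1, u2 = r.split(' ')
--         del_dict[u2].append(u1)
--
--
--     # k번 이상 신고 받은 user를 신고한 user가 받을 이메일 갯수
--     for u, v in del_dict.items():
--         if len(v) >= k:
--             for id in v:
--                 total[id] += 1
--
--     # id_list에 따라 total에서 찾아 answer 정리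
--     for id in id_list:
--         if id in total:
--             answer.append(total[id])
--         else:
--             answer.append(0)
--
--     return answer
-- ===== SOURCE B (Python) =====
-- def solution(id_list, report, k):
--     pairs = [r.split(' ') for r in set(report)]
--     targets = [u2 for _, u2 in pairs]
--     bad = {t for t in targets if targets.count(t) >= k}
--     return [sum(1 for u1, u2 in pairs if u1 == id and u2 in bad) for id in id_list]
-- ===== Notes on version B (the rewrite author's own statement) =====
-- stated objective: simpler
-- what changed: B drops all dictionaries: it parses the deduped reports into pairs once, derives the set of k-reported targets by counting occurrences directly in the targets list, and answers each id by directly counting its reports against that set, instead of A's defaultdict grouping of reporter lists, nested tally loop and dict lookups.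
import Mathlib
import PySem

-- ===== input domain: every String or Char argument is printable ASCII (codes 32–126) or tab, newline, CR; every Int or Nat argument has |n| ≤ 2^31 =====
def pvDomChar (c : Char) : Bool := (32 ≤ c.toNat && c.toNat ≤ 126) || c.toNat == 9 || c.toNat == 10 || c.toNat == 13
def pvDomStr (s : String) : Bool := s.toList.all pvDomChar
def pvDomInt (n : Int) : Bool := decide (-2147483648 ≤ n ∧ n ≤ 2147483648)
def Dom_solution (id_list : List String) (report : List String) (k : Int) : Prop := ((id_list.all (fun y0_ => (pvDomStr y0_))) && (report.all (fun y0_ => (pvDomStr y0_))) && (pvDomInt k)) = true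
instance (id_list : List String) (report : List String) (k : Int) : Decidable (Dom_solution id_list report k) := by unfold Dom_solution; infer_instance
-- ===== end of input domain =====

-- B drops A's dictionaries entirely: it parses the deduped reports once, derives the set of
-- k-reported targets by counting in the targets list, and answers each id by a direct count
-- of its qualifying reports (simpler decomposition, no speed claim).

-- shared step "u1, u2 = r.split(' ')": some (u1, u2) when the split has exactly two parts, none where Python raises
def pySplit2 (r : String) : Option (String × String) :=
  match PySem.Str.split? r " " with
  | some [u1, u2] => some (u1, u2)
  | _ => none

-- ===== PORT A =====
def solution (id_list : List String) (report : List String) (k : Int) : List Int :=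
  let delDict : PySem.Dict String (List String) :=
    (PySem.Set.ofList report : List String).foldl (fun d r =>
      match pySplit2 r with
      | some p => d.modify p.2 [] (fun v => v ++ [p.1])
      | none => d) PySem.Dict.empty
  let total : PySem.Dict String Int :=
    delDict.items.foldl (fun t uv =>
      if k ≤ (uv.2.length : Int) then
        uv.2.foldl (fun t i => t.modify i 0 (· + 1)) t
      else t) PySem.Dict.empty
  id_list.foldl (fun answer i =>
    answer ++ [if total.contains i then total.getD i 0 else 0]) []

-- ===== PORT B =====
def solution_alt (id_list : List String) (report : List String) (k : Int) : List Int :=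
  let pairs : List (String × String) := (PySem.Set.ofList report : List String).filterMap pySplit2
  let targets : List String := pairs.map (fun p => p.2)
  let bad : List String := PySem.Set.ofList (targets.filter (fun t => k ≤ ((targets.count t : Nat) : Int)))
  id_list.map (fun i => ((pairs.countP (fun p => p.1 == i && bad.contains p.2)) : Int))

-- ===== PRECONDITION & SPEC =====
-- Pre_ excludes exactly the inputs where some report string does not split on ' ' into exactly
-- two parts: there Python's unpacking "u1, u2 = r.split(' ')" raises ValueError in both A and B.
def Pre_solution (id_list : List String) (report : List String) (k : Int) : Prop :=
  ∀ r ∈ report, ((PySem.Str.split? r " ").getD []).length = 2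
instance (id_list : List String) (report : List String) (k : Int) : Decidable (Pre_solution id_list report k) := by unfold Pre_solution; infer_instance

def pvWitness_solution : List String × List String × Int := (["muzi", "frodo"], ["muzi frodo", "apeach frodo"], 1)

def Spec_solution (id_list : List String) (report : List String) (k : Int) (out : List Int) : Prop := out = solution_alt id_list report k
instance (id_list : List String) (report : List String) (k : Int) (out : List Int) : Decidable (Spec_solution id_list report k out) := by unfold Spec_solution; infer_instance

-- ===== CLAIM (what is proved, stated in full; the proofs are below) =====
def Claim_equal_solution : Prop := ∀ (id_list : List String) (report : List String) (k : Int), Dom_solution id_list report k → Pre_solution id_list report k → Spec_solution id_list report k (solution id_list report k)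

-- ===== LEMMAS AND PROOFS =====

-- a fold whose step skips the unsplittable strings is a fold over the parsed pairs
theorem foldl_pySplit2 {δ : Type} (f : δ → String × String → δ) (l : List String) (d : δ) :
    l.foldl (fun d r => match pySplit2 r with | some p => f d p | none => d) d
      = (l.filterMap pySplit2).foldl f d := by
  induction l generalizing d with
  | nil => rfl
  | cons r l ih =>
    cases h : pySplit2 r <;> simp [h, ih]

-- a list dict built by grouped appends: lookup gives the first components, in order
theorem getD_group (prs : List (String × String)) (t : String) :
    (prs.foldl (fun d p => d.modify p.2 [] (fun v => v ++ [p.1])) (PySem.Dict.empty : PySem.Dict String (List String))).getD t []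
      = (prs.filter (fun p => p.2 == t)).map Prod.fst := by
  have h : prs.foldl (fun d p => d.modify p.2 [] (fun v => v ++ [p.1])) (PySem.Dict.empty : PySem.Dict String (List String))
      = (prs.map (fun p => (p.2, p.1))).foldl (fun d p => d.modify p.1 [] (fun v => v ++ [p.2])) PySem.Dict.empty := by
    rw [List.foldl_map]
  rw [h, PySem.Dict.getD_foldl_modify_append, List.filter_map]
  simp [PySem.Dict.getD_empty, Function.comp_def]

-- A's total fold over the items list, characterised as a sum
theorem totalFold (k : Int) (its : List (String × List String)) (t0 : PySem.Dict String Int) (i : String) :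
    (its.foldl (fun t uv =>
        if k ≤ (uv.2.length : Int) then uv.2.foldl (fun t i => t.modify i 0 (· + 1)) t else t) t0).getD i 0
      = t0.getD i 0 + (its.map (fun uv => if k ≤ (uv.2.length : Int) then (uv.2.count i : Int) else 0)).sum := by
  induction its generalizing t0 with
  | nil => simp
  | cons uv its ih =>
    simp only [List.foldl_cons, List.map_cons, List.sum_cons, ih]
    split_ifs with h
    · rw [PySem.Dict.getD_foldl_modify_add_one]; ring
    · ring

-- partition a countP over a duplicate-free list of the values of f
theorem sum_part {α κ : Type} [BEq κ] [LawfulBEq κ] (l : List α) (f : α → κ) (P : α → Bool)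
    (S : List κ) (hnd : S.Nodup) (hall : ∀ x ∈ l, f x ∈ S) :
    (S.map (fun t => l.countP (fun x => P x && (f x == t)))).sum = l.countP P := by
  induction l with
  | nil => simp
  | cons x l ih =>
    have hx : f x ∈ S := hall x (by simp)
    have hl : ∀ y ∈ l, f y ∈ S := fun y hy => hall y (by simp [hy])
    simp only [List.countP_cons]
    have hsplit : (S.map (fun t => l.countP (fun y => P y && (f y == t)) + if (P x && (f x == t)) = true then 1 else 0)).sum
        = (S.map (fun t => l.countP (fun y => P y && (f y == t)))).sum
          + (S.map (fun t => if (P x && (f x == t)) = true then 1 else 0)).sum := by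
      rw [← List.sum_map_add]
    rw [hsplit, ih hl]
    congr 1
    by_cases hP : P x = true
    · have h1 : (S.map (fun t => if (P x && (f x == t)) = true then 1 else 0)).sum
          = S.countP (fun t => f x == t) := by
        simp only [hP, Bool.true_and]
        exact PySem.List.sum_map_ite_one_zero_nat _ _
      rw [h1]
      have h2 : S.countP (fun t => f x == t) = S.count (f x) := by
        unfold List.count
        apply List.countP_congr
        intro t _
        simp [BEq.comm]
      rw [h2, List.count_eq_one_of_mem hnd hx]
      simp [hP]
    · simp [hP]

-- defaultdict lookup guarded by a membership test equals getD
theorem contains_getD (d : PySem.Dict String Int) (i : String) :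
    (if d.contains i then d.getD i 0 else 0) = d.getD i 0 := by
  by_cases h : d.contains i = true
  · simp [h]
  · have hnone : d.get? i = none := by
      rw [PySem.Dict.contains_eq_isSome_get?] at h
      cases hg : d.get? i with
      | none => rfl
      | some v => rw [hg] at h; simp at h
    simp [h, PySem.Dict.getD, hnone]

-- the per-id value of A's grouped sum equals a direct count over the filtered pairs
theorem per_id (prs : List (String × String)) (k : Int) (i : String) :
    ((PySem.Set.ofList (prs.map Prod.snd) : List String).map
        (fun t => if k ≤ (((prs.filter (fun p => p.2 == t)).map Prod.fst).length : Int)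
                  then (((prs.filter (fun p => p.2 == t)).map Prod.fst).count i : Int) else 0)).sum
      = (((prs.filter (fun p => decide (k ≤ (((prs.map Prod.snd).count p.2 : Nat) : Int)))).map Prod.fst).count i : Int) := by
  have hlen : ∀ t : String, ((prs.filter (fun p => p.2 == t)).map Prod.fst).length = (prs.map Prod.snd).count t := by
    intro t
    rw [List.length_map, ← List.countP_eq_length_filter, List.count, List.countP_map]
    apply List.countP_congr
    intro p _
    simp [BEq.comm]
  have hcnt : ∀ t : String, ((prs.filter (fun p => p.2 == t)).map Prod.fst).count i
      = prs.countP (fun p => (p.1 == i) && (p.2 == t)) := by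
    intro t
    rw [List.count, List.countP_map, List.countP_filter]
    apply List.countP_congr
    intro p _
    simp [Function.comp]
  have hterm : ∀ t : String,
      (if k ≤ (((prs.filter (fun p => p.2 == t)).map Prod.fst).length : Int)
       then (((prs.filter (fun p => p.2 == t)).map Prod.fst).count i : Int) else 0)
      = ((prs.countP (fun p => ((p.1 == i) && decide (k ≤ (((prs.map Prod.snd).count p.2 : Nat) : Int))) && (p.2 == t)) : Nat) : Int) := by
    intro t
    rw [hlen, hcnt]
    by_cases hq : k ≤ (((prs.map Prod.snd).count t : Nat) : Int)
    · rw [if_pos hq]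
      congr 1
      apply List.countP_congr
      intro p _
      by_cases h2 : p.2 = t
      · simp [h2, hq]
      · simp [h2]
    · rw [if_neg hq]
      have : prs.countP (fun p => ((p.1 == i) && decide (k ≤ (((prs.map Prod.snd).count p.2 : Nat) : Int))) && (p.2 == t)) = 0 := by
        rw [List.countP_eq_zero]
        intro p _
        by_cases h2 : p.2 = t
        · simp [h2, hq]
        · simp [h2]
      rw [this]
      simp
  calc ((PySem.Set.ofList (prs.map Prod.snd) : List String).map
        (fun t => if k ≤ (((prs.filter (fun p => p.2 == t)).map Prod.fst).length : Int)
                  then (((prs.filter (fun p => p.2 == t)).map Prod.fst).count i : Int) else 0)).sum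
      = ((PySem.Set.ofList (prs.map Prod.snd) : List String).map
        (fun t => ((prs.countP (fun p => ((p.1 == i) && decide (k ≤ (((prs.map Prod.snd).count p.2 : Nat) : Int))) && (p.2 == t)) : Nat) : Int))).sum := by
        apply congrArg
        apply List.map_congr_left
        intro t _
        exact hterm t
    _ = (((PySem.Set.ofList (prs.map Prod.snd) : List String).map
        (fun t => prs.countP (fun p => ((p.1 == i) && decide (k ≤ (((prs.map Prod.snd).count p.2 : Nat) : Int))) && (p.2 == t)))).sum : Nat) := by
        rw [Nat.cast_list_sum, List.map_map]
        rfl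
    _ = (prs.countP (fun p => (p.1 == i) && decide (k ≤ (((prs.map Prod.snd).count p.2 : Nat) : Int))) : Int) := by
        congr 1
        apply sum_part prs Prod.snd _ _ (PySem.Set.nodup_ofList _)
        intro p hp
        rw [PySem.Set.mem_ofList]
        exact List.mem_map_of_mem hp
    _ = (((prs.filter (fun p => decide (k ≤ (((prs.map Prod.snd).count p.2 : Nat) : Int)))).map Prod.fst).count i : Int) := by
        rw [List.count, List.countP_map, List.countP_filter]
        congr 1

-- A's dict pipeline per id, characterised as a sum over the distinct targets
theorem A_value (prs : List (String × String)) (k : Int) (i : String) :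
    ((prs.foldl (fun d p => d.modify p.2 [] (fun v => v ++ [p.1])) (PySem.Dict.empty : PySem.Dict String (List String))).items.foldl
        (fun t uv => if k ≤ (uv.2.length : Int) then uv.2.foldl (fun t i => t.modify i 0 (· + 1)) t else t)
        PySem.Dict.empty).getD i 0
      = ((PySem.Set.ofList (prs.map Prod.snd) : List String).map
          (fun t => if k ≤ (((prs.filter (fun p => p.2 == t)).map Prod.fst).length : Int)
                    then (((prs.filter (fun p => p.2 == t)).map Prod.fst).count i : Int) else 0)).sum := by
  rw [totalFold, PySem.Dict.getD_empty, zero_add]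
  have hnd : (prs.foldl (fun d p => d.modify p.2 [] (fun v => v ++ [p.1])) (PySem.Dict.empty : PySem.Dict String (List String))).keys.Nodup := by
    apply PySem.Dict.nodup_keys_foldl_modify_key
    simp [PySem.Dict.keys_empty]
  rw [PySem.Dict.items_eq_map_keys _ hnd [], PySem.Dict.keys_foldl_modify_key, PySem.Dict.keys_empty, List.map_map]
  apply congrArg
  apply List.map_congr_left
  intro t _
  simp only [Function.comp_apply, getD_group]

-- B's direct per-id count against the bad-target set, characterised the same way
theorem B_value (prs : List (String × String)) (k : Int) (i : String) :
    ((prs.countP (fun p => p.1 == i &&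
        (PySem.Set.ofList ((prs.map (fun p => p.2)).filter (fun t => k ≤ (((prs.map (fun p => p.2)).count t : Nat) : Int))) : List String).contains p.2)) : Int)
      = (((prs.filter (fun p => decide (k ≤ (((prs.map Prod.snd).count p.2 : Nat) : Int)))).map Prod.fst).count i : Int) := by
  have hmap : (prs.map (fun p : String × String => p.2)) = prs.map Prod.snd := rfl
  rw [hmap]
  have hrhs : ((prs.filter (fun p => decide (k ≤ (((prs.map Prod.snd).count p.2 : Nat) : Int)))).map Prod.fst).count i
      = prs.countP (fun p => (p.1 == i) && decide (k ≤ (((prs.map Prod.snd).count p.2 : Nat) : Int))) := by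
    rw [List.count, List.countP_map, List.countP_filter]
    apply List.countP_congr
    intro p _
    simp [Function.comp]
  rw [hrhs]
  have hset : ∀ p ∈ prs, ((PySem.Set.ofList ((prs.map Prod.snd).filter (fun t => k ≤ (((prs.map Prod.snd).count t : Nat) : Int))) : List String).contains p.2)
      = decide (k ≤ (((prs.map Prod.snd).count p.2 : Nat) : Int)) := by
    intro p hp
    have hmem : p.2 ∈ prs.map Prod.snd := List.mem_map_of_mem hp
    by_cases hq : k ≤ (((prs.map Prod.snd).count p.2 : Nat) : Int)
    · rw [decide_eq_true hq]
      exact (PySem.Set.contains_iff _ _).mpr ((PySem.Set.mem_ofList _ _).mpr (List.mem_filter.mpr ⟨hmem, by simp [hq]⟩))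
    · rw [decide_eq_false hq, Bool.eq_false_iff]
      intro hc
      have := List.mem_filter.mp ((PySem.Set.mem_ofList _ _).mp ((PySem.Set.contains_iff _ _).mp hc))
      exact hq (by simpa using this.2)
  congr 1
  apply List.countP_congr
  intro p hp
  rw [hset p hp]

-- ===== VERDICT (by name: the statement is the Claim_ definition above) =====
theorem solution_spec : Claim_equal_solution := by
  intro id_list report k _ _
  show solution id_list report k = solution_alt id_list report k
  simp only [solution, solution_alt, foldl_pySplit2]
  rw [PySem.List.foldl_append_singleton_eq_map, List.nil_append]
  apply List.map_congr_left
  intro i _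
  rw [contains_getD, A_value, per_id, ← B_value]
  rfl
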